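-- pv_equiv track=rewrite | github.com/openvinotoolkit/nncf | nncf/torch/tensor_statistics/reduction.py | get_channel_count_and_dim_idx
-- ===== SOURCE A (Python) =====
-- from typing import List, Tuple
--
-- def get_channel_count_and_dim_idx(scale_shape: List[int]) -> Tuple[int, int]:
--     channel_dim_idx = 0
--     channel_count = 1
--     for dim_idx, dim in enumerate(scale_shape):
--         if dim != 1:
--             channel_dim_idx = dim_idx
--             channel_count = dim
--     return channel_count, channel_dim_idx
-- ===== SOURCE B (Python) =====
-- from typing import List, Tuple
--
-- def get_channel_count_and_dim_idx(scale_shape: List[int]) -> Tuple[int, int]: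
--     for dim_idx, dim in reversed(list(enumerate(scale_shape))):
--         if dim != 1:
--             return dim, dim_idx
--     return 1, 0
-- ===== Notes on version B (the rewrite author's own statement) =====
-- stated objective: simpler
-- what changed: Replaces the full forward scan that overwrites a running (count, idx) accumulator with a backward search that returns the last non-unit dimension at the first hit.
import Mathlib
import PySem

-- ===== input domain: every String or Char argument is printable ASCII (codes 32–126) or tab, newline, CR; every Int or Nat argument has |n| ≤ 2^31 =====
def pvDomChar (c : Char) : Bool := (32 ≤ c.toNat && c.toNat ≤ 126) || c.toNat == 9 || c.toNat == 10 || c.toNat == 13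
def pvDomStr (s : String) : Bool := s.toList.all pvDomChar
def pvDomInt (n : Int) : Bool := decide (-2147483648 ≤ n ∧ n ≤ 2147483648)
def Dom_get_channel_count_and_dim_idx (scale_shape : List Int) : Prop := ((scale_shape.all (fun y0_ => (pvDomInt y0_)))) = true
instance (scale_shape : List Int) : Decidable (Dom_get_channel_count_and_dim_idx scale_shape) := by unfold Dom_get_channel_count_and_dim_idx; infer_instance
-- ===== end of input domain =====

-- B replaces A's forward overwrite-scan with a backward early-return search (simpler decomposition, same cost).

-- ===== PORT A =====
-- forward loop over enumerate, state (channel_count, channel_dim_idx) overwritten at each non-unit dim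
def get_channel_count_and_dim_idx (scale_shape : List Int) : Int × Int :=
  (PySem.List.enumerate scale_shape 0).foldl
    (fun s p => if p.2 ≠ 1 then (p.2, p.1) else s) (1, 0)

-- ===== PORT B =====
-- backward search: first non-unit dim of the reversed enumerated list, default (1, 0)
def pvRevFind : List (Int × Int) → Int × Int
  | [] => (1, 0)
  | p :: rest => if p.2 ≠ 1 then (p.2, p.1) else pvRevFind rest

def get_channel_count_and_dim_idx_alt (scale_shape : List Int) : Int × Int :=
  pvRevFind (PySem.List.enumerate scale_shape 0).reverse

-- ===== PRECONDITION & SPEC =====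
def Spec_get_channel_count_and_dim_idx (scale_shape : List Int) (out : Int × Int) : Prop := out = get_channel_count_and_dim_idx_alt scale_shape
instance (scale_shape : List Int) (out : Int × Int) : Decidable (Spec_get_channel_count_and_dim_idx scale_shape out) := by unfold Spec_get_channel_count_and_dim_idx; infer_instance

-- ===== CLAIM (what is proved, stated in full; the proofs are below) =====
def Claim_equal_get_channel_count_and_dim_idx : Prop := ∀ (scale_shape : List Int), Dom_get_channel_count_and_dim_idx scale_shape → Spec_get_channel_count_and_dim_idx scale_shape (get_channel_count_and_dim_idx scale_shape)

-- ===== LEMMAS AND PROOFS =====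

-- backward search with an arbitrary default state
def pvRevFindS (s : Int × Int) : List (Int × Int) → Int × Int
  | [] => s
  | p :: rest => if p.2 ≠ 1 then (p.2, p.1) else pvRevFindS s rest

theorem pvRevFindS_append (s : Int × Int) (l : List (Int × Int)) (p : Int × Int) :
    pvRevFindS s (l ++ [p]) = pvRevFindS (if p.2 ≠ 1 then (p.2, p.1) else s) l := by
  induction l with
  | nil => simp [pvRevFindS]
  | cons q t ih => simp [pvRevFindS, ih]

theorem foldl_eq_revFindS (l : List (Int × Int)) (s : Int × Int) :
    l.foldl (fun s p => if p.2 ≠ 1 then (p.2, p.1) else s) s = pvRevFindS s l.reverse := by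
  induction l generalizing s with
  | nil => simp [pvRevFindS]
  | cons q t ih =>
    rw [List.foldl_cons, ih, List.reverse_cons, pvRevFindS_append]

theorem pvRevFind_eq (l : List (Int × Int)) : pvRevFind l = pvRevFindS (1, 0) l := by
  induction l with
  | nil => rfl
  | cons q t ih => simp [pvRevFind, pvRevFindS, ih]

-- ===== VERDICT (by name: the statement is the Claim_ definition above) =====
theorem get_channel_count_and_dim_idx_spec : Claim_equal_get_channel_count_and_dim_idx := by
  intro scale_shape _
  unfold Spec_get_channel_count_and_dim_idx get_channel_count_and_dim_idx get_channel_count_and_dim_idx_alt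
  rw [pvRevFind_eq, foldl_eq_revFindS]
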